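-- pv_equiv track=rewrite | github.com/hpc/simulator | basefiles/intervalset.py | from_list_to_intervalset
-- ===== SOURCE A (Python) =====
-- def from_list_to_intervalset(array):
--     array.sort()
--     intervalset=""
--     #ok array is sorted
--     previous_value=0
--     for i in range(0,len(array)):
--         if i==0:
--             intervalset+=str(array[i])
--         else:
--             if not(intervalset[len(intervalset)-1] == '-'):
--                 #ok we are not in a current interval
--                 if array[i] == (previous_value+1):
--                     #ok we need to start an interval
--                     intervalset+="-"
--                     if i==len(array)-1:
--                         #ok we need to end the interval, we are at the end
--                         intervalset+=str(array[i])
--                 else: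
--                     #ok we need to put the number in the intervalset
--                     intervalset+=" "+str(array[i])
--             else:
--                 #ok we are in a current interval
--                 if array[i] == (previous_value+1):
--                     #ok the intervalset continues
--                     if i==len(array)-1:
--                         #ok we are at the end, we need to close off the interval
--                         intervalset+=str(array[i])
--                     else:
--                         #ok we need to continue the interval by doing nothing
--                         intervalset+=""
--                 else:
--                     #ok we need to finish the interval
--                     intervalset+=str(previous_value)+" "+str(array[i])
--         previous_value=array[i]
--     return intervalset
-- ===== SOURCE B (Python) =====
-- def from_list_to_intervalset(array):
--     array.sort()
--     runs = []
--     for x in array: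
--         if runs and x == runs[-1][1] + 1:
--             runs[-1][1] = x
--         else:
--             runs.append([x, x])
--     return " ".join(str(s) if s == e else str(s) + "-" + str(e)
--                     for s, e in runs)
-- ===== Notes on version B (the rewrite author's own statement) =====
-- stated objective: simpler
-- what changed: B replaces A's single-pass state machine that decides what to emit by inspecting the output string's trailing character with a group-then-format decomposition: it collects maximal consecutive runs of the sorted list as (start,end) pairs and then renders and space-joins them.
import Mathlib
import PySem

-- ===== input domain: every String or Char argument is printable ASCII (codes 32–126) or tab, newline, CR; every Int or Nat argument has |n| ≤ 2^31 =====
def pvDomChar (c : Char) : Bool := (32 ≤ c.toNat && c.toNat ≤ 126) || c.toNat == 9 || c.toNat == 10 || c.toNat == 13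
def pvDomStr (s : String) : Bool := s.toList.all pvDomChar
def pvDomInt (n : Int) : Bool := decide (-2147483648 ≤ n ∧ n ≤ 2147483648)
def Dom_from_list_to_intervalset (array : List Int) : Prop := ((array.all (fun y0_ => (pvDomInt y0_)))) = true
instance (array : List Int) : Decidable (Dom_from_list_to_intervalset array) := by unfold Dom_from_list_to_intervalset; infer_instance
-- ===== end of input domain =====

-- B groups the sorted list into maximal consecutive runs first and then formats/joins them, instead of
-- A's state machine that steers on the output string's trailing character (objective: simpler).
-- Both A and B sort `array` in place in Python; the equivalence proved here is about the return value.

-- ===== PORT A =====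
-- loop body of A's `for i in range(0, len(array))`; state = (intervalset as List Char, previous_value)
def aBody (arr : List Int) (st : List Char × Int) (i : Int) : List Char × Int :=
  let iv := st.1
  let prev := st.2
  let x := PySem.List.pyGetD arr i 0         -- array[i]; i is always in range here
  let iv' :=
    if i = 0 then iv ++ PySem.Int.toChars x
    else if ¬ (PySem.List.pyGetD iv (PySem.List.len iv - 1) ' ' = '-') then
      -- intervalset[len(intervalset)-1]: the string is never empty when i ≥ 1, so the default is never read
      if x = prev + 1 then
        let iv2 := iv ++ ['-']
        if i = PySem.List.len arr - 1 then iv2 ++ PySem.Int.toChars x else iv2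
      else iv ++ ' ' :: PySem.Int.toChars x
    else
      if x = prev + 1 then
        if i = PySem.List.len arr - 1 then iv ++ PySem.Int.toChars x else iv ++ []
      else iv ++ PySem.Int.toChars prev ++ ' ' :: PySem.Int.toChars x
  (iv', x)

def from_list_to_intervalset (array : List Int) : String :=
  let arr := PySem.List.sorted array (fun x => x) false
  let st := (PySem.List.pyRange 0 (PySem.List.len arr) 1).foldl (aBody arr) ([], 0)
  String.ofList st.1

-- ===== PORT B =====
-- str(s) if s == e else str(s) + "-" + str(e)
def fmtRun (r : Int × Int) : List Char :=
  if r.1 = r.2 then PySem.Int.toChars r.1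
  else PySem.Int.toChars r.1 ++ '-' :: PySem.Int.toChars r.2

-- `runs` is kept in REVERSE order (Python appends to / updates the END of `runs`):
-- `if runs and x == runs[-1][1] + 1: runs[-1][1] = x` / `else: runs.append([x, x])`
def bStep (runs : List (Int × Int)) (x : Int) : List (Int × Int) :=
  match runs with
  | [] => [(x, x)]
  | r :: rest => if x = r.2 + 1 then (r.1, x) :: rest else (x, x) :: r :: rest

def from_list_to_intervalset_alt (array : List Int) : String :=
  let arr := PySem.List.sorted array (fun x => x) false
  let runs := (arr.foldl bStep []).reverse
  String.ofList (PySem.Chars.join [' '] (runs.map fmtRun))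

-- ===== PRECONDITION & SPEC =====
def Spec_from_list_to_intervalset (array : List Int) (out : String) : Prop := out = from_list_to_intervalset_alt array
instance (array : List Int) (out : String) : Decidable (Spec_from_list_to_intervalset array out) := by unfold Spec_from_list_to_intervalset; infer_instance

-- ===== CLAIM (what is proved, stated in full; the proofs are below) =====
def Claim_equal_from_list_to_intervalset : Prop := ∀ (array : List Int), Dom_from_list_to_intervalset array → Spec_from_list_to_intervalset array (from_list_to_intervalset array)

-- ===== LEMMAS AND PROOFS =====

-- the runs of the remaining elements, given the current run [s, e] (proof-side common shape)
def runsAux (s e : Int) : List Int → List (Int × Int)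
  | [] => [(s, e)]
  | x :: xs => if x = e + 1 then runsAux s x xs else (s, e) :: runsAux x x xs

-- A's loop from index 1 on, rephrased structurally over the remaining elements
def aGo : List Char × Int → List Int → List Char × Int
  | st, [] => st
  | (iv, prev), x :: rest =>
    let iv' :=
      if ¬ (PySem.List.pyGetD iv (PySem.List.len iv - 1) ' ' = '-') then
        if x = prev + 1 then
          let iv2 := iv ++ ['-']
          if rest = [] then iv2 ++ PySem.Int.toChars x else iv2
        else iv ++ ' ' :: PySem.Int.toChars x
      else
        if x = prev + 1 then
          if rest = [] then iv ++ PySem.Int.toChars x else iv ++ []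
        else iv ++ PySem.Int.toChars prev ++ ' ' :: PySem.Int.toChars x
    aGo (iv', x) rest

lemma digitChar_lt_ne_dash : ∀ k < 16, Nat.digitChar k ≠ '-' := by decide

lemma digitChar_ge_eq_star (k : Nat) (h : 16 ≤ k) : Nat.digitChar k = '*' := by
  unfold Nat.digitChar
  rw [if_neg (by omega), if_neg (by omega), if_neg (by omega), if_neg (by omega),
      if_neg (by omega), if_neg (by omega), if_neg (by omega), if_neg (by omega),
      if_neg (by omega), if_neg (by omega), if_neg (by omega), if_neg (by omega),
      if_neg (by omega), if_neg (by omega), if_neg (by omega), if_neg (by omega)]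

lemma digitChar_ne_dash (k : Nat) : Nat.digitChar k ≠ '-' := by
  rcases Nat.lt_or_ge k 16 with h | h
  · exact digitChar_lt_ne_dash k h
  · rw [digitChar_ge_eq_star k h]; decide

lemma toDigitsCore_concat : ∀ (fuel n : Nat) (ds : List Char),
    ∃ l, Nat.toDigitsCore 10 (fuel + 1) n ds = l ++ Nat.digitChar (n % 10) :: ds := by
  intro fuel
  induction fuel with
  | zero =>
      intro n ds
      refine ⟨[], ?_⟩
      unfold Nat.toDigitsCore
      dsimp only
      split <;> rfl
  | succ f ih =>
      intro n ds
      by_cases h : n / 10 = 0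
      · exact ⟨[], by unfold Nat.toDigitsCore; dsimp only; rw [if_pos h]; rfl⟩
      · obtain ⟨l, hl⟩ := ih (n / 10) (Nat.digitChar (n % 10) :: ds)
        refine ⟨l ++ [Nat.digitChar (n / 10 % 10)], ?_⟩
        unfold Nat.toDigitsCore
        rw [if_neg h]
        rw [hl]
        simp

lemma toChars_concat (n : Int) : ∃ l c, PySem.Int.toChars n = l ++ [c] ∧ c ≠ '-' := by
  unfold PySem.Int.toChars Nat.toDigits
  split
  · obtain ⟨l, hl⟩ := toDigitsCore_concat n.natAbs n.natAbs []
    exact ⟨'-' :: l, _, by rw [hl]; rfl, digitChar_ne_dash _⟩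
  · obtain ⟨l, hl⟩ := toDigitsCore_concat n.toNat n.toNat []
    exact ⟨l, _, by rw [hl], digitChar_ne_dash _⟩

lemma lastCharD (l : List Char) (c d : Char) :
    PySem.List.pyGetD (l ++ [c]) (PySem.List.len (l ++ [c]) - 1) d = c := by
  have h1 : PySem.List.len (l ++ [c]) - 1 = ((l.length : Nat) : Int) := by
    simp [PySem.List.len_eq]
  rw [h1, PySem.List.pyGetD_natCast]
  simp [List.getD]

lemma join_cons (sep a : List Char) (rs : List (List Char)) (h : rs ≠ []) :
    PySem.Chars.join sep (a :: rs) = a ++ sep ++ PySem.Chars.join sep rs := by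
  cases rs with
  | nil => exact absurd rfl h
  | cons b t => rw [PySem.Chars.join_cons_cons]

lemma runsAux_ne_nil (s e : Int) (xs : List Int) : runsAux s e xs ≠ [] := by
  induction xs generalizing s e with
  | nil => simp [runsAux]
  | cons x xs ih =>
      simp only [runsAux]
      split
      · exact ih s x
      · simp

lemma bFold (xs : List Int) : ∀ (s e : Int) (rest : List (Int × Int)),
    xs.foldl bStep ((s, e) :: rest) = (runsAux s e xs).reverse ++ rest := by
  induction xs with
  | nil => intro s e rest; simp [runsAux]
  | cons x xs ih =>
      intro s e rest
      simp only [List.foldl_cons, bStep, runsAux]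
      split
      · exact ih s x rest
      · rw [ih x x ((s, e) :: rest)]
        simp

lemma foldA_eq_aGo (post : List Int) : ∀ (pre : List Int) (st : List Char × Int), pre ≠ [] →
    (PySem.List.pyRange (pre.length : Int) (PySem.List.len (pre ++ post)) 1).foldl
      (aBody (pre ++ post)) st = aGo st post := by
  induction post with
  | nil =>
      intro pre st _
      rw [PySem.List.pyRange_one_eq_nil (by simp [PySem.List.len_eq])]
      rfl
  | cons x rest ih =>
      intro pre st hpre
      have hlen : PySem.List.len (pre ++ x :: rest) = ((pre.length : Int) + 1 + rest.length) := by
        simp [PySem.List.len_eq]; ring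
      rw [PySem.List.pyRange_one_cons (by rw [hlen]; omega)]
      rw [List.foldl_cons]
      -- the first step is aGo's step
      have hx : PySem.List.pyGetD (pre ++ x :: rest) ((pre.length : Nat) : Int) 0 = x := by
        rw [PySem.List.pyGetD_natCast]
        simp
      have h0 : ((pre.length : Nat) : Int) ≠ 0 := by
        simp [List.length_eq_zero_iff, hpre]
      have hlast : (((pre.length : Nat) : Int) = PySem.List.len (pre ++ x :: rest) - 1) ↔ rest = [] := by
        rw [hlen]
        constructor
        · intro h
          have : (rest.length : Int) = 0 := by omega
          simpa [List.length_eq_zero_iff] using this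
        · intro h; subst h; simp
      have hstep : aBody (pre ++ x :: rest) st ((pre.length : Nat) : Int) =
          (let iv := st.1
           let prev := st.2
           let iv' :=
             if ¬ (PySem.List.pyGetD iv (PySem.List.len iv - 1) ' ' = '-') then
               if x = prev + 1 then
                 let iv2 := iv ++ ['-']
                 if rest = [] then iv2 ++ PySem.Int.toChars x else iv2
               else iv ++ ' ' :: PySem.Int.toChars x
             else
               if x = prev + 1 then
                 if rest = [] then iv ++ PySem.Int.toChars x else iv ++ []
               else iv ++ PySem.Int.toChars prev ++ ' ' :: PySem.Int.toChars x
           (iv', x)) := by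
        simp only [aBody, hx, if_neg h0]
        by_cases hr : rest = []
        · simp only [hr, iff_true] at hlast
          simp only [if_pos hlast, hr]
          simp
        · have : ¬ (((pre.length : Nat) : Int) = PySem.List.len (pre ++ x :: rest) - 1) :=
            fun h => hr (hlast.mp h)
          simp only [if_neg this, if_neg hr]
      rw [hstep]
      have hre : pre ++ x :: rest = (pre ++ [x]) ++ rest := by simp
      have hlen2 : ((pre.length : Int) + 1) = (((pre ++ [x]).length : Nat) : Int) := by
        simp
      conv_lhs => rw [hre, hlen2]
      rw [ih (pre ++ [x]) _ (by simp)]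
      rfl

lemma aGo_main (xs : List Int) : ∀ (s e : Int) (acc : List Char), s ≤ e → (s = e ∨ xs ≠ []) →
    (aGo (acc ++ PySem.Int.toChars s ++ (if s = e then [] else ['-']), e) xs).1
      = acc ++ PySem.Chars.join [' '] ((runsAux s e xs).map fmtRun) := by
  induction xs with
  | nil =>
      intro s e acc hse hne
      have h : s = e := hne.resolve_right (fun h => h rfl)
      subst h
      simp [aGo, runsAux, PySem.Chars.join_singleton, fmtRun]
  | cons x rest ih =>
      intro s e acc hse hne
      by_cases hs : s = e
      · subst hs
        -- current run is a singleton: the string ends with a digit, not '-'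
        obtain ⟨l, c, hl, hc⟩ := toChars_concat s
        have hivform : acc ++ PySem.Int.toChars s ++ (if s = s then [] else ['-']) = (acc ++ l) ++ [c] := by
          simp [hl]
        have htest : PySem.List.pyGetD ((acc ++ l) ++ [c]) (PySem.List.len ((acc ++ l) ++ [c]) - 1) ' ' = c :=
          lastCharD _ _ _
        rw [hivform]
        simp only [aGo, htest]
        rw [if_pos hc]
        by_cases hx : x = s + 1
        · have hsx : s ≠ x := by omega
          rw [if_pos hx]
          by_cases hr : rest = []
          · subst hr
            simp only [aGo, runsAux, if_pos hx]
            simp [hl, fmtRun, if_neg hsx, PySem.Chars.join_singleton]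
          · rw [if_neg hr]
            have hiv : ((acc ++ l) ++ [c]) ++ ['-']
                = acc ++ PySem.Int.toChars s ++ (if s = x then [] else ['-']) := by
              simp [hl, if_neg hsx]
            rw [hiv, ih s x acc (by omega) (Or.inr hr)]
            simp only [runsAux, if_pos hx]
        · rw [if_neg hx]
          have hiv : ((acc ++ l) ++ [c]) ++ ' ' :: PySem.Int.toChars x
              = (acc ++ PySem.Int.toChars s ++ [' ']) ++ PySem.Int.toChars x ++ (if x = x then [] else ['-']) := by
            simp [hl]
          rw [hiv, ih x x (acc ++ PySem.Int.toChars s ++ [' ']) (le_refl x) (Or.inl rfl)]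
          have hrw : runsAux s s (x :: rest) = (s, s) :: runsAux x x rest := by
            simp only [runsAux, if_neg hx]
          rw [hrw, List.map_cons,
              join_cons [' '] _ _ (fun hm => runsAux_ne_nil x x rest (List.map_eq_nil_iff.mp hm))]
          simp [fmtRun]
      · -- current run is open: the string ends with '-'
        have hivform : acc ++ PySem.Int.toChars s ++ (if s = e then [] else ['-'])
            = (acc ++ PySem.Int.toChars s) ++ ['-'] := by
          simp [if_neg hs]
        have htest : PySem.List.pyGetD ((acc ++ PySem.Int.toChars s) ++ ['-'])
            (PySem.List.len ((acc ++ PySem.Int.toChars s) ++ ['-']) - 1) ' ' = '-' :=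
          lastCharD _ _ _
        rw [hivform]
        simp only [aGo, htest]
        rw [if_neg (by simp)]
        by_cases hx : x = e + 1
        · have hsx : s ≠ x := by omega
          rw [if_pos hx]
          by_cases hr : rest = []
          · subst hr
            simp only [aGo, runsAux, if_pos hx]
            simp [fmtRun, if_neg hsx, PySem.Chars.join_singleton]
          · rw [if_neg hr]
            have hiv : ((acc ++ PySem.Int.toChars s) ++ ['-']) ++ []
                = acc ++ PySem.Int.toChars s ++ (if s = x then [] else ['-']) := by
              simp [if_neg hsx]
            rw [hiv, ih s x acc (by omega) (Or.inr hr)]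
            simp only [runsAux, if_pos hx]
        · rw [if_neg hx]
          have hiv : ((acc ++ PySem.Int.toChars s) ++ ['-']) ++ PySem.Int.toChars e ++ ' ' :: PySem.Int.toChars x
              = (acc ++ (PySem.Int.toChars s ++ '-' :: PySem.Int.toChars e) ++ [' '])
                  ++ PySem.Int.toChars x ++ (if x = x then [] else ['-']) := by
            simp
          rw [hiv, ih x x (acc ++ (PySem.Int.toChars s ++ '-' :: PySem.Int.toChars e) ++ [' ']) (le_refl x) (Or.inl rfl)]
          have hrw : runsAux s e (x :: rest) = (s, e) :: runsAux x x rest := by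
            simp only [runsAux, if_neg hx]
          rw [hrw, List.map_cons,
              join_cons [' '] _ _ (fun hm => runsAux_ne_nil x x rest (List.map_eq_nil_iff.mp hm))]
          simp [fmtRun, if_neg hs]

-- ===== VERDICT (by name: the statement is the Claim_ definition above) =====
theorem from_list_to_intervalset_spec : Claim_equal_from_list_to_intervalset := by
  unfold Claim_equal_from_list_to_intervalset
  intro array _
  unfold Spec_from_list_to_intervalset from_list_to_intervalset from_list_to_intervalset_alt
  cases harr : PySem.List.sorted array (fun x => x) false with
  | nil => rfl
  | cons x xs =>
      have hA : (PySem.List.pyRange 0 (PySem.List.len (x :: xs)) 1).foldl (aBody (x :: xs)) ([], 0)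
          = aGo (PySem.Int.toChars x, x) xs := by
        rw [PySem.List.pyRange_one_cons (by simp only [PySem.List.len_eq, List.length_cons]; push_cast; omega)]
        rw [List.foldl_cons]
        have h1 : aBody (x :: xs) ([], 0) 0 = (PySem.Int.toChars x, x) := by
          simp [aBody, PySem.List.pyGetD_zero_cons]
        rw [h1]
        have := foldA_eq_aGo xs [x] (PySem.Int.toChars x, x) (by simp)
        simpa using this
      have hB : ((x :: xs).foldl bStep []).reverse = runsAux x x xs := by
        rw [List.foldl_cons]
        show (xs.foldl bStep ((x, x) :: [])).reverse = _
        rw [bFold xs x x []]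
        simp
      simp only [hA, hB]
      have := aGo_main xs x x [] (le_refl x) (Or.inl rfl)
      simp at this
      rw [this]
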